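-- pv_equiv track=rewrite | github.com/Shobhit1/pythonPractice | anagram.py | anagramQuestion
-- ===== SOURCE A (Python) =====
-- def anagramQuestion(list1, input):
-- 	dict1 = {}
-- 	for x in range(0,len(list1)):
-- 		key = ''.join(sorted(list1[x]))
-- 		if key in dict1:
-- 			dict1[key].append(list1[x])
-- 		else:
-- 			dict1[key] = [list1[x]]
-- 	result = []
-- 	for x in dict1:
-- 		inputsorted = ''.join(sorted(input))
-- 		if x == inputsorted:
-- 			dict1[x].remove(input)
-- 			result.append(dict1[x])
--
-- 	return result
-- ===== SOURCE B (Python) =====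
-- def anagramQuestion(list1, input):
--     inputsorted = ''.join(sorted(input))
--     group = [w for w in list1 if ''.join(sorted(w)) == inputsorted]
--     if not group:
--         return []
--     group.remove(input)
--     return [group]
-- ===== Notes on version B (the rewrite author's own statement) =====
-- stated objective: simpler
-- what changed: B drops A's sorted-key grouping dict and the key-scanning second loop: it sorts input once and collects the anagram group with a single direct filter over list1, whereas A re-computes ''.join(sorted(input)) for every distinct key.
import Mathlib
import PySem

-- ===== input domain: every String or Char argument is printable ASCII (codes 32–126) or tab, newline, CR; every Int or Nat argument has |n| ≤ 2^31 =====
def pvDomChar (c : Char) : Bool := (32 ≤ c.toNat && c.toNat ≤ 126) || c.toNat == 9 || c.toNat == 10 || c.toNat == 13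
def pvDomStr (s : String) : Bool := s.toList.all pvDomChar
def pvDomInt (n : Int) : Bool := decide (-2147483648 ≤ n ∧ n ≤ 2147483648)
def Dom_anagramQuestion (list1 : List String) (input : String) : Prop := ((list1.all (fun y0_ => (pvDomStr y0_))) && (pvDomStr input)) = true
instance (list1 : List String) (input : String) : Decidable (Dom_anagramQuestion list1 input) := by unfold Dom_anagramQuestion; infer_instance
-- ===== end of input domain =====

-- B replaces A's sorted-key grouping dict + key scan (which re-sorts input once per distinct
-- key) by one direct filter on the input's sorted signature, computed once (simpler,
-- and intended to be faster on many distinct keys). Return-value equivalence: A mutates its dict's group list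
-- in place, B its own fresh list; neither program mutates the arguments.

-- shared helper: ''.join(sorted(s)) — Python sorts the string's characters by code point;
-- joining the resulting one-character strings is exactly String.ofList of the sorted char list
def agKey (s : String) : String := String.ofList (PySem.List.sorted s.toList (fun c => c) false)

-- ===== PORT A =====
def anagramQuestion (list1 : List String) (input : String) : List (List String) :=
  let dict1 := (PySem.List.pyRange 0 (PySem.List.len list1) 1).foldl
    (fun d x =>
      let w := PySem.List.pyGetD list1 x ""
      let key := agKey w
      if d.contains key then d.modify key [] (· ++ [w]) else d.insert key [w])
    PySem.Dict.empty
  dict1.keys.foldl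
    (fun result x =>
      let inputsorted := agKey input
      if x == inputsorted then
        -- dict1[x].remove(input): on ValueError (none, excluded by Pre_) the unmutated list stands in
        match PySem.List.remove? (dict1.getD x []) input with
        | some g => result ++ [g]
        | none => result ++ [dict1.getD x []]
      else result)
    []

-- ===== PORT B =====
def anagramQuestion_alt (list1 : List String) (input : String) : List (List String) :=
  let inputsorted := agKey input
  let group := list1.filter (fun w => agKey w == inputsorted)
  if group = [] then []
  else
    -- group.remove(input): ValueError (none) is excluded by Pre_
    match PySem.List.remove? group input with
    | some g => [g]
    | none => []

-- ===== PRECONDITION & SPEC =====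
-- Pre_ excludes exactly the inputs on which BOTH Pythons raise ValueError (list.remove):
-- some word of list1 is an anagram of input but input itself does not occur in list1.
def Pre_anagramQuestion (list1 : List String) (input : String) : Prop :=
  input ∈ list1 ∨ ∀ w ∈ list1, agKey w ≠ agKey input
instance (list1 : List String) (input : String) : Decidable (Pre_anagramQuestion list1 input) := by unfold Pre_anagramQuestion; infer_instance
def pvWitness_anagramQuestion : List String × String := (["ab", "ba", "cd"], "ba")
def Spec_anagramQuestion (list1 : List String) (input : String) (out : List (List String)) : Prop := out = anagramQuestion_alt list1 input
instance (list1 : List String) (input : String) (out : List (List String)) : Decidable (Spec_anagramQuestion list1 input out) := by unfold Spec_anagramQuestion; infer_instance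

-- ===== CLAIM (what is proved, stated in full; the proofs are below) =====
def Claim_equal_anagramQuestion : Prop := ∀ (list1 : List String) (input : String), Dom_anagramQuestion list1 input → Pre_anagramQuestion list1 input → Spec_anagramQuestion list1 input (anagramQuestion list1 input)

-- ===== LEMMAS AND PROOFS =====

-- A's grouping-loop body (append if present, else seed) is exactly dict.modify
theorem ag_step_eq (d : PySem.Dict String (List String)) (w : String) :
    (if d.contains (agKey w) then d.modify (agKey w) [] (· ++ [w]) else d.insert (agKey w) [w])
      = d.modify (agKey w) [] (· ++ [w]) := by
  by_cases h : d.contains (agKey w) = true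
  · simp [h]
  · have hf : d.contains (agKey w) = false := by simpa using h
    have := PySem.Dict.getD_of_not_contains (d := d) (k := agKey w) (d0 := ([] : List String)) hf
    simp [hf, PySem.Dict.modify, this]

-- A's dict, written as the canonical grouping fold
def agDict (list1 : List String) : PySem.Dict String (List String) :=
  list1.foldl (fun d w => d.modify (agKey w) [] (· ++ [w])) PySem.Dict.empty

theorem agDict_getD (list1 : List String) (c : String) :
    (agDict list1).getD c [] = list1.filter (fun w => agKey w == c) := by
  have h := PySem.Dict.getD_foldl_modify_append
      (l := list1.map (fun w => (agKey w, w))) (d := (PySem.Dict.empty : PySem.Dict String (List String))) (c := c)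
  rw [List.foldl_map] at h
  unfold agDict
  rw [h, List.filter_map, List.map_map]
  simp [Function.comp_def]

theorem agDict_keys (list1 : List String) :
    (agDict list1).keys = PySem.Set.ofList (list1.map agKey) := by
  unfold agDict
  rw [PySem.Dict.keys_foldl_modify_key]
  have h2 := PySem.Set.ofList_append (xs := ([] : List String)) (ys := list1.map agKey)
  simp only [List.nil_append, PySem.Set.ofList_nil] at h2
  simp [PySem.Dict.keys_empty, ← h2]

theorem agDict_keys_nodup (list1 : List String) : (agDict list1).keys.Nodup := by
  unfold agDict
  exact PySem.Dict.nodup_keys_foldl_modify_key _ _ _ _ _ (by simp)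

theorem nodup_filter_beq (l : List String) (a : String) (h : l.Nodup) :
    l.filter (fun x => x == a) = if a ∈ l then [a] else [] := by
  induction l with
  | nil => simp
  | cons x t ih =>
    rcases List.nodup_cons.mp h with ⟨hx, ht⟩
    by_cases hxa : x = a
    · subst hxa
      simp [ih ht, hx]
    · simp [hxa, ih ht, Ne.symm hxa]

-- ===== VERDICT (by name: the statement is the Claim_ definition above) =====
theorem anagramQuestion_spec : Claim_equal_anagramQuestion := by
  intro list1 input _ hpre
  unfold Spec_anagramQuestion anagramQuestion anagramQuestion_alt
  -- the indexed loop over range(len(list1)) is the fold over list1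
  rw [PySem.List.foldl_pyRange_zero_pyGetD list1 ""
        (fun d w => if d.contains (agKey w) then d.modify (agKey w) [] (· ++ [w]) else d.insert (agKey w) [w])
        PySem.Dict.empty]
  rw [PySem.List.foldl_congr_mem
        (l := list1) (init := (PySem.Dict.empty : PySem.Dict String (List String)))
        (f := fun d w => if d.contains (agKey w) then d.modify (agKey w) [] (· ++ [w]) else d.insert (agKey w) [w])
        (g := fun d w => d.modify (agKey w) [] (· ++ [w]))
        (fun d w _ => ag_step_eq d w)]
  rw [show list1.foldl (fun d w => d.modify (agKey w) [] (· ++ [w])) PySem.Dict.empty = agDict list1 from rfl]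
  -- the second loop appends one element per matching key
  rw [PySem.List.foldl_congr_mem
      (l := (agDict list1).keys) (init := ([] : List (List String)))
      (f := fun result x =>
        if x == agKey input then
          match PySem.List.remove? ((agDict list1).getD x []) input with
          | some g => result ++ [g]
          | none => result ++ [(agDict list1).getD x []]
        else result)
      (g := fun result x =>
        if x == agKey input then
          result ++ [match PySem.List.remove? ((agDict list1).getD x []) input with
                     | some g => g
                     | none => (agDict list1).getD x []]
        else result)
      (fun result x _ => by
        by_cases hx : x == agKey input
        · simp only [hx]
          cases PySem.List.remove? ((agDict list1).getD x []) input <;> rfl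
        · simp [hx])]
  rw [PySem.List.foldl_append_if]
  rw [agDict_keys, nodup_filter_beq _ _ (by
        rw [← agDict_keys]; exact agDict_keys_nodup list1)]
  by_cases hmem : agKey input ∈ list1.map agKey
  · have hmem' : agKey input ∈ PySem.Set.ofList (list1.map agKey) :=
      (PySem.Set.mem_ofList _ _).mpr hmem
    rw [if_pos hmem']
    obtain ⟨w0, hw0, hkw0⟩ := List.mem_map.mp hmem
    have hgrp : list1.filter (fun w => agKey w == agKey input) ≠ [] := by
      intro hnil
      have := List.filter_eq_nil_iff.mp hnil w0 hw0
      simp [hkw0] at this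
    rw [if_neg hgrp]
    rcases hpre with hin | hno
    · -- input ∈ list1, hence input is in the group and remove? succeeds
      have hing : input ∈ list1.filter (fun w => agKey w == agKey input) :=
        List.mem_filter.mpr ⟨hin, by simp⟩
      simp only [List.map_cons, List.map_nil, List.nil_append]
      rw [agDict_getD, PySem.List.remove?_eq_some_erase _ _ hing]
    · exact absurd (hkw0 ▸ rfl) (hno w0 hw0)
  · have hmem' : agKey input ∉ PySem.Set.ofList (list1.map agKey) := by
      simpa [PySem.Set.mem_ofList] using hmem
    rw [if_neg hmem']
    have hgrp : list1.filter (fun w => agKey w == agKey input) = [] := by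
      apply List.filter_eq_nil_iff.mpr
      intro w hw
      simp only [beq_iff_eq]
      exact fun he => hmem (List.mem_map.mpr ⟨w, hw, he⟩)
    rw [if_pos hgrp]
    simp
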